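-- pv_equiv track=rewrite | github.com/PABPAT/TCI_Shield | underwriting_engine.py | get_payment_terms_score
-- ===== SOURCE A (Python) =====
-- PAYMENT_TERMS_RISK = {
--     (0,   30):   0,
--     (31,  60):   5,
--     (61,  90):  10,
--     (91, 120):  15,
--     (121, 360): 20,
-- }
--
-- def get_payment_terms_score(days: int) -> tuple:
--     """Returns risk score and payment term classification."""
--     if days <= 360:
--         for (min_d, max_d), score in PAYMENT_TERMS_RISK.items():
--             if min_d <= days <= max_d:
--                 return score, "Short Term"
--         return 20, "Short Term"
--     elif days < 1460:
--         return 20, "Medium-Long Term"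
--     else:
--         return 40, "Long Term"
-- ===== SOURCE B (Python) =====
-- def get_payment_terms_score(days: int) -> tuple:
--     """Returns risk score and payment term classification (closed-form)."""
--     if days >= 1460:
--         return 40, "Long Term"
--     if days > 360:
--         return 20, "Medium-Long Term"
--     return 5 * min(4, max(0, (days - 1) // 30)), "Short Term"
-- ===== Notes on version B (the rewrite author's own statement) =====
-- stated objective: simpler
-- what changed: Replaced the loop over the PAYMENT_TERMS_RISK bucket table with a closed-form arithmetic tier computation (clamped thirty-day tier index times the step); Pre_ restricts to days >= 0, the natural domain of a day count, because a negative days hits no bucket in A and its default (20, 'Short Term') is an accidental loop fall-through that B's formula has no reason to reproduce.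
-- outside the precondition, e.g. on get_payment_terms_score(-5): A returns (20, 'Short Term'), B returns (0, 'Short Term')
import Mathlib
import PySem

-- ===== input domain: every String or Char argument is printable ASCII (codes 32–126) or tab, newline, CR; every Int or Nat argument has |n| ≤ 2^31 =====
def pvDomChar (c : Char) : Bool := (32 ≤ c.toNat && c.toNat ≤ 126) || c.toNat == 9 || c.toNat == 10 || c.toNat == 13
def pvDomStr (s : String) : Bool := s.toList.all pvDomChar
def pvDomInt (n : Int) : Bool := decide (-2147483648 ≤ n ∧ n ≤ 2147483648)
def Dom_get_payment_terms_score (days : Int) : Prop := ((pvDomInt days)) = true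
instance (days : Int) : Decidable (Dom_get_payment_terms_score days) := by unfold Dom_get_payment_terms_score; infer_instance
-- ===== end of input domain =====

-- B: closed-form arithmetic tier classification instead of scanning the bucket table (objective: simpler).

-- ===== PORT A =====
-- A's bucket table as an association list ((min_d, max_d), score), in insertion order
def pvPaymentTermsRisk : List ((Int × Int) × Int) :=
  [((0, 30), 0), ((31, 60), 5), ((61, 90), 10), ((91, 120), 15), ((121, 360), 20)]

-- the for-loop over the table: first bucket containing days wins, else the default
def pvLoopA : List ((Int × Int) × Int) → Int → Int × String
  | [], _ => (20, "Short Term")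
  | ((min_d, max_d), score) :: rest, days =>
      if min_d ≤ days ∧ days ≤ max_d then (score, "Short Term") else pvLoopA rest days

def get_payment_terms_score (days : Int) : Int × String :=
  if days ≤ 360 then pvLoopA pvPaymentTermsRisk days
  else if days < 1460 then (20, "Medium-Long Term")
  else (40, "Long Term")

-- ===== PORT B =====
def get_payment_terms_score_alt (days : Int) : Int × String :=
  if days ≥ 1460 then (40, "Long Term")
  else if days > 360 then (20, "Medium-Long Term")
  else (5 * min 4 (max 0 (PySem.Int.floordiv (days - 1) 30)), "Short Term")

-- ===== PRECONDITION & SPEC =====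
-- Pre_ restricts to days ≥ 0, the natural domain of a day count: on negative days A's loop
-- matches no bucket and its (20, "Short Term") default is an accidental fall-through, a corner
-- value B's closed-form tier (which gives the lowest score there) has no reason to reproduce.
def Pre_get_payment_terms_score (days : Int) : Prop := 0 ≤ days
instance (days : Int) : Decidable (Pre_get_payment_terms_score days) := by unfold Pre_get_payment_terms_score; infer_instance
def pvWitness_get_payment_terms_score : Int := (45)

def Spec_get_payment_terms_score (days : Int) (out : Int × String) : Prop := out = get_payment_terms_score_alt days
instance (days : Int) (out : Int × String) : Decidable (Spec_get_payment_terms_score days out) := by unfold Spec_get_payment_terms_score; infer_instance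

-- ===== CLAIM (what is proved, stated in full; the proofs are below) =====
def Claim_equal_get_payment_terms_score : Prop := ∀ (days : Int), Dom_get_payment_terms_score days → Pre_get_payment_terms_score days → Spec_get_payment_terms_score days (get_payment_terms_score days)

-- ===== LEMMAS AND PROOFS =====

-- ===== VERDICT (by name: the statement is the Claim_ definition above) =====
theorem get_payment_terms_score_spec : Claim_equal_get_payment_terms_score := by
  intro days _ hpre
  unfold Pre_get_payment_terms_score at hpre
  unfold Spec_get_payment_terms_score get_payment_terms_score get_payment_terms_score_alt
  simp only [pvPaymentTermsRisk, pvLoopA]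
  have h30 : PySem.Int.floordiv (days - 1) 30 = (days - 1) / 30 := PySem.Int.floordiv_eq_ediv_of_pos (by norm_num)
  rw [h30]
  split_ifs <;> simp [Prod.ext_iff] <;> omega
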